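-- pv_equiv track=rewrite | github.com/voicetreelab/voicetree-evals | metabench/hch/masked_block_jobshop/jobshop_instance.py | _family_sizes
-- ===== SOURCE A (Python) =====
-- def _family_sizes(n_jobs: int) -> tuple[int, int, int, int]:
--     base = n_jobs // 4
--     remainder = n_jobs % 4
--     sizes = [base] * 4
--     for index in range(remainder):
--         sizes[index] += 1
--     sizes.sort(reverse=True)
--     return tuple(sizes)  # type: ignore[return-value]
-- ===== SOURCE B (Python) =====
-- def _family_sizes(n_jobs: int) -> tuple[int, int, int, int]:
--     # Slot k receives every 4th job starting at job k (0-indexed round-robin),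
--     # so its size is ceil((n_jobs - k) / 4) = (n_jobs + 3 - k) // 4 — a
--     # per-slot closed formula with no remainder distribution and no sort.
--     return ((n_jobs + 3) // 4, (n_jobs + 2) // 4, (n_jobs + 1) // 4, n_jobs // 4)
-- ===== Notes on version B (the rewrite author's own statement) =====
-- stated objective: simpler
-- what changed: Replaces the list-build, remainder increment loop and reverse sort with an independent per-slot closed formula: slot k gets ceil((n_jobs-k)/4) = (n_jobs+3-k)//4 jobs, the size of its round-robin share; no remainder, no mutation, no sort.
import Mathlib
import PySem

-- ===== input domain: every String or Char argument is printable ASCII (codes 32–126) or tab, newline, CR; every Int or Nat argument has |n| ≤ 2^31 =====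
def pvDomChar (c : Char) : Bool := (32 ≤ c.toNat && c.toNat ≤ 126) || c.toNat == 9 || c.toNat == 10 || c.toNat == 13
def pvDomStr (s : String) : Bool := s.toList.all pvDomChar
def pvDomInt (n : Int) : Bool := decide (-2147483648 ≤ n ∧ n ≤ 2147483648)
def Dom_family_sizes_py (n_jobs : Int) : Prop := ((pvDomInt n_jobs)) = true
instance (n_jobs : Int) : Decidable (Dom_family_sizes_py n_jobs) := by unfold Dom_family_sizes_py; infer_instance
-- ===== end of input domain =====

-- B computes each family size independently as its round-robin share ceil((n-k)/4) = (n+3-k)//4,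
-- replacing A's list build + increment loop + reverse sort; objective: simpler (same O(1) cost).

-- ===== PORT A =====
def family_sizes_py (n_jobs : Int) : Int × Int × Int × Int :=
  let base := PySem.Int.floordiv n_jobs 4
  let remainder := PySem.Int.mod n_jobs 4
  let sizes := List.replicate 4 base
  let sizes := (PySem.List.pyRange 0 remainder 1).foldl
    (fun s i => PySem.List.pySetD s i (PySem.List.pyGetD s i 0 + 1)) sizes
  let sizes := PySem.List.sorted sizes id true
  -- tuple(sizes): sizes always has length 4; the wildcard branch is unreachable
  match sizes with
  | [a, b, c, d] => (a, b, c, d)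
  | _ => (0, 0, 0, 0)

-- ===== PORT B =====
def family_sizes_py_alt (n_jobs : Int) : Int × Int × Int × Int :=
  (PySem.Int.floordiv (n_jobs + 3) 4,
   PySem.Int.floordiv (n_jobs + 2) 4,
   PySem.Int.floordiv (n_jobs + 1) 4,
   PySem.Int.floordiv n_jobs 4)

-- ===== PRECONDITION & SPEC =====
def Spec_family_sizes_py (n_jobs : Int) (out : Int × Int × Int × Int) : Prop := out = family_sizes_py_alt n_jobs
instance (n_jobs : Int) (out : Int × Int × Int × Int) : Decidable (Spec_family_sizes_py n_jobs out) := by unfold Spec_family_sizes_py; infer_instance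

-- ===== CLAIM (what is proved, stated in full; the proofs are below) =====
def Claim_equal_family_sizes_py : Prop := ∀ (n_jobs : Int), Dom_family_sizes_py n_jobs → Spec_family_sizes_py n_jobs (family_sizes_py n_jobs)

-- ===== LEMMAS AND PROOFS =====

-- Python's % with positive divisor is Lean's emod, bounded in [0, 4)
theorem pv_mod4_cases (n : Int) :
    PySem.Int.mod n 4 = 0 ∨ PySem.Int.mod n 4 = 1 ∨ PySem.Int.mod n 4 = 2 ∨ PySem.Int.mod n 4 = 3 := by
  rw [PySem.Int.mod_eq_emod_of_pos (by norm_num)]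
  omega

-- A's value in each remainder case (the loop and sort evaluated symbolically)
theorem pv_A_eval (n : Int) :
    family_sizes_py n =
      (let b := PySem.Int.floordiv n 4
       let r := PySem.Int.mod n 4
       if r = 1 then (b + 1, b, b, b)
       else if r = 2 then (b + 1, b + 1, b, b)
       else if r = 3 then (b + 1, b + 1, b + 1, b)
       else (b, b, b, b)) := by
  unfold family_sizes_py
  rcases pv_mod4_cases n with h | h | h | h <;> rw [h] <;>
    set b := PySem.Int.floordiv n 4 with hb
  · have : PySem.List.sorted [b, b, b, b] id true = [b, b, b, b] :=
      PySem.List.sorted_rev_eq_self_of_pairwise _ _ (by simp [List.pairwise_cons])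
    simp_all [PySem.List.pySetD, PySem.List.pySet?,
      PySem.List.pyGetD, PySem.List.pyGet?, PySem.List.pyIdx?, List.replicate]
  · have : PySem.List.sorted [b + 1, b, b, b] id true = [b + 1, b, b, b] :=
      PySem.List.sorted_rev_eq_self_of_pairwise _ _ (by
        simp [List.pairwise_cons]; try omega)
    simp_all [show PySem.List.pyRange 0 1 1 = [0] from by decide,
      PySem.List.pySetD, PySem.List.pySet?, PySem.List.pyGetD, PySem.List.pyGet?,
      PySem.List.pyIdx?, List.replicate]
  · have : PySem.List.sorted [b + 1, b + 1, b, b] id true = [b + 1, b + 1, b, b] :=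
      PySem.List.sorted_rev_eq_self_of_pairwise _ _ (by
        simp [List.pairwise_cons]; try omega)
    simp_all [show PySem.List.pyRange 0 2 1 = [0, 1] from by decide,
      PySem.List.pySetD, PySem.List.pySet?, PySem.List.pyGetD, PySem.List.pyGet?,
      PySem.List.pyIdx?, List.replicate]
  · have : PySem.List.sorted [b + 1, b + 1, b + 1, b] id true = [b + 1, b + 1, b + 1, b] :=
      PySem.List.sorted_rev_eq_self_of_pairwise _ _ (by
        simp [List.pairwise_cons]; try omega)
    simp_all [show PySem.List.pyRange 0 3 1 = [0, 1, 2] from by decide,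
      PySem.List.pySetD, PySem.List.pySet?, PySem.List.pyGetD, PySem.List.pyGet?,
      PySem.List.pyIdx?, List.replicate]

theorem pv_key (n : Int) : family_sizes_py n = family_sizes_py_alt n := by
  rw [pv_A_eval]
  unfold family_sizes_py_alt
  rw [PySem.Int.floordiv_eq_ediv_of_pos (a := n) (by norm_num),
      PySem.Int.floordiv_eq_ediv_of_pos (a := n + 1) (by norm_num),
      PySem.Int.floordiv_eq_ediv_of_pos (a := n + 2) (by norm_num),
      PySem.Int.floordiv_eq_ediv_of_pos (a := n + 3) (by norm_num),
      PySem.Int.mod_eq_emod_of_pos (by norm_num)]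
  simp only []
  split_ifs <;> refine Prod.ext ?_ (Prod.ext ?_ (Prod.ext ?_ ?_)) <;> simp <;> omega

-- ===== VERDICT (by name: the statement is the Claim_ definition above) =====
theorem family_sizes_py_spec : Claim_equal_family_sizes_py := by
  intro n _
  exact pv_key n
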